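-- pv_equiv track=rewrite | github.com/softkleenex/workspace | studying_25.02.13~/14626.py | check
-- ===== SOURCE A (Python) =====
-- def check (list1):
--     a = 0
--     for i in range(len(list1)):
--         if i % 2 == 0:
--             a = a + list1[i] * 1
--         else:
--             a = a + list1[i] * 3
--
--
--
--
--     if  a % 10 == 0:
--         return True
--     else:
--         return False
-- ===== SOURCE B (Python) =====
-- def check(list1):
--     return (sum(list1[::2]) + 3 * sum(list1[1::2])) % 10 == 0
-- ===== Notes on version B (the rewrite author's own statement) =====
-- stated objective: simpler
-- what changed: replaces the index loop with a per-element parity branch by a parity split into the two strided slices list1[::2] and list1[1::2], summing each once with builtin sum and returning the comparison directly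
import Mathlib
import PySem

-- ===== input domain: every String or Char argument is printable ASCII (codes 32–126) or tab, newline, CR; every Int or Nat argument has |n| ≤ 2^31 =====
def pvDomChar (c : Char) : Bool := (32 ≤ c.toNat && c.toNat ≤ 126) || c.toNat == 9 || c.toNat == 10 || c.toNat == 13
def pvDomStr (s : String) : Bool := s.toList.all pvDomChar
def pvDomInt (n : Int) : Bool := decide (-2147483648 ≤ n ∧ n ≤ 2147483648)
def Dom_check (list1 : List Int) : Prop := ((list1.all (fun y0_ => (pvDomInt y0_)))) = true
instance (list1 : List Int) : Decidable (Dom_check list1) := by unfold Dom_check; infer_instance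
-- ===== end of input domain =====

-- B replaces A's index loop (parity branch per element) by a parity split into the two
-- strided slices list1[::2] and list1[1::2], summed once each; objective: simpler.

-- ===== PORT A =====
def check (list1 : List Int) : Bool :=
  let a : Int :=
    (PySem.List.pyRange 0 list1.length 1).foldl
      (fun a i =>
        if PySem.Int.mod i 2 == 0 then a + PySem.List.pyGetD list1 i 0 * 1
        else a + PySem.List.pyGetD list1 i 0 * 3) 0
  if PySem.Int.mod a 10 == 0 then true else false

-- ===== PORT B =====
def check_alt (list1 : List Int) : Bool :=
  PySem.Int.mod (((PySem.List.slice? list1 none none 2).getD []).sum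
      + 3 * ((PySem.List.slice? list1 (some 1) none 2).getD []).sum) 10 == 0

-- ===== PRECONDITION & SPEC =====
def Spec_check (list1 : List Int) (out : Bool) : Prop := out = check_alt list1
instance (list1 : List Int) (out : Bool) : Decidable (Spec_check list1 out) := by unfold Spec_check; infer_instance

-- ===== CLAIM (what is proved, stated in full; the proofs are below) =====
def Claim_equal_check : Prop := ∀ (list1 : List Int), Dom_check list1 → Spec_check list1 (check list1)

-- ===== LEMMAS AND PROOFS =====

-- even-indexed and odd-indexed elements (proof-side characterisation of the two slices)
def pvEvens : List Int → List Int
  | [] => []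
  | [x] => [x]
  | x :: _ :: rest => x :: pvEvens rest

def pvOdds : List Int → List Int
  | [] => []
  | [_] => []
  | _ :: y :: rest => y :: pvOdds rest

-- A's weighted sum, two elements at a time (intermediate between the two ports)
def checkGo : List Int → Int
  | [] => 0
  | [x] => x
  | x :: y :: rest => x + 3 * y + checkGo rest

-- A's loop body, over the full list ys
def checkStep (ys : List Int) (a : Int) (i : Int) : Int :=
  if PySem.Int.mod i 2 == 0 then a + PySem.List.pyGetD ys i 0 * 1
  else a + PySem.List.pyGetD ys i 0 * 3

-- invariant of A's loop: starting the index loop at an even position j whose suffix is xs,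
-- the fold adds exactly checkGo xs to the accumulator
lemma check_loop_inv (xs : List Int) : ∀ (ys : List Int) (j : ℕ) (acc : Int),
    j % 2 = 0 → ys.drop j = xs →
    (PySem.List.pyRange (j : Int) (ys.length : Int) 1).foldl (checkStep ys) acc
      = acc + checkGo xs := by
  induction xs using checkGo.induct with
  | case1 =>
      intro ys j acc hj hdrop
      have hlen : ys.length ≤ j := by
        by_contra h
        have := List.drop_eq_nil_iff.mp hdrop
        omega
      rw [PySem.List.pyRange_one_eq_nil (by exact_mod_cast hlen)]
      simp [checkGo]
  | case2 x =>
      intro ys j acc hj hdrop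
      have hj' : j < ys.length := by
        by_contra h
        have : ys.drop j = [] := List.drop_eq_nil_iff.mpr (by omega)
        simp [this] at hdrop
      have hlen : ys.length = j + 1 := by
        have := congrArg List.length hdrop
        simp [List.length_drop] at this
        omega
      have hx : ys[j]? = some x := by
        have := congrArg (fun l => l[0]?) hdrop
        simpa [List.getElem?_drop] using this
      rw [PySem.List.pyRange_one_cons (by exact_mod_cast hj')]
      rw [PySem.List.pyRange_one_eq_nil (by omega)]
      have hdvd : (2 : Int) ∣ (j : Int) := by omega
      simp [checkStep, checkGo, hdvd, hx]
  | case3 x y rest ih =>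
      intro ys j acc hj hdrop
      have hlen2 : j + 2 ≤ ys.length := by
        have := congrArg List.length hdrop
        simp [List.length_drop] at this
        omega
      have hx : ys[j]? = some x := by
        have := congrArg (fun l => l[0]?) hdrop
        simpa [List.getElem?_drop] using this
      have hy : ys[j+1]? = some y := by
        have := congrArg (fun l => l[1]?) hdrop
        simpa [List.getElem?_drop] using this
      have hrest : ys.drop (j+2) = rest := by
        have : (ys.drop j).drop 2 = rest := by rw [hdrop]; rfl
        simpa [List.drop_drop, Nat.add_comm] using this
      rw [PySem.List.pyRange_one_cons (by exact_mod_cast (by omega : j < ys.length))]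
      rw [PySem.List.pyRange_one_cons (by exact_mod_cast (by omega : j + 1 < ys.length))]
      have hmj : (2 : Int) ∣ (j : Int) := by omega
      have hmj1 : ¬ (2 : Int) ∣ ((j : Int) + 1) := by omega
      have hIH := ih ys (j + 2) (checkStep ys (checkStep ys acc j) ((j : Int) + 1)) (by omega) hrest
      push_cast at hIH ⊢
      rw [List.foldl_cons, List.foldl_cons,
        show ((j : Int) + 1 + 1) = (j : Int) + 2 by ring] at *
      have hy2 : PySem.List.pyGetD ys ((j : Int) + 1) 0 = y := by
        rw [show ((j : Int) + 1) = ((j + 1 : ℕ) : Int) by push_cast; ring,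
          PySem.List.pyGetD_natCast]
        simp [List.getD, hy]
      rw [hIH]
      simp [checkStep, checkGo, hmj, hmj1, hx]
      rw [hy2]
      ring

-- the filterMap core of slice? with stride 2 starting at 0 is pvEvens
lemma filterMap_stride_evens (xs : List Int) :
    List.filterMap (fun k : ℕ => xs[2 * k]?) (List.range ((xs.length + 1) / 2)) = pvEvens xs := by
  induction xs using pvEvens.induct with
  | case1 => simp [pvEvens]
  | case2 x => simp [pvEvens, List.range_succ]
  | case3 x y rest ih =>
      have hm : ((x :: y :: rest).length + 1) / 2 = (rest.length + 1) / 2 + 1 := by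
        simp; omega
      rw [hm, List.range_succ_eq_map, List.filterMap_cons, List.filterMap_map]
      have hf : ((fun k : ℕ => (x :: y :: rest)[2 * k]?) ∘ (· + 1))
          = fun k : ℕ => rest[2 * k]? := by
        funext k
        simp [Function.comp, Nat.mul_add]
      rw [hf, ih]
      simp [pvEvens]

lemma slice_evens (xs : List Int) :
    PySem.List.slice? xs none none 2 = some (pvEvens xs) := by
  unfold PySem.List.slice? PySem.List.sliceIndices
  simp only [if_neg (by norm_num : ¬ (2:Int) = 0)]
  have h2 : ¬ ((2:Int) < 0) := by norm_num
  simp only [h2, if_false, if_pos (by norm_num : (0:Int) < 2)]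
  have hcount : (if (0:Int) < (xs.length : Int)
      then (((xs.length : Int) - 0 + 2 - 1) / 2).toNat else 0) = (xs.length + 1) / 2 := by
    split_ifs with h <;> omega
  have hidx : ∀ k : ℕ, (((0:Int) + 2 * (k:Int)).toNat) = 2 * k := by intro k; omega
  simp only [hcount, hidx]
  rw [filterMap_stride_evens]

lemma pvOdds_cons (x : Int) (rest : List Int) : pvOdds (x :: rest) = pvEvens rest := by
  induction rest using pvEvens.induct generalizing x with
  | case1 => rfl
  | case2 z => rfl
  | case3 z w r ih => simp [pvOdds, pvEvens, ih]

lemma slice_odds (xs : List Int) :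
    PySem.List.slice? xs (some 1) none 2 = some (pvOdds xs) := by
  cases xs with
  | nil => rfl
  | cons x rest =>
      unfold PySem.List.slice? PySem.List.sliceIndices
      simp only [if_neg (by norm_num : ¬ (2:Int) = 0),
        if_neg (by norm_num : ¬ (2:Int) < 0),
        if_pos (by norm_num : (0:Int) < 2),
        if_neg (by norm_num : ¬ (1:Int) < 0)]
      have hstart : min (1:Int) (((x :: rest).length : Int)) = 1 := by
        simp only [List.length_cons]; push_cast; omega
      rw [hstart]
      have hcount : (if (1:Int) < ((x :: rest).length : Int)
          then ((((x :: rest).length : Int) - 1 + 2 - 1) / 2).toNat else 0)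
          = (rest.length + 1) / 2 := by
        simp only [List.length_cons]; push_cast
        split_ifs with h <;> omega
      rw [hcount]
      have hidx : ∀ k : ℕ, (x :: rest)[((1:Int) + 2 * (k:Int)).toNat]? = rest[2 * k]? := by
        intro k
        rw [show ((1:Int) + 2 * (k:Int)).toNat = 2 * k + 1 by omega]
        simp
      simp only [hidx, filterMap_stride_evens rest, pvOdds_cons]

-- A's two-at-a-time sum is the weighted sum of the two parity classes
lemma checkGo_eq_parity (xs : List Int) :
    checkGo xs = (pvEvens xs).sum + 3 * (pvOdds xs).sum := by
  induction xs using checkGo.induct with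
  | case1 => simp [checkGo, pvEvens, pvOdds]
  | case2 x => simp [checkGo, pvEvens, pvOdds]
  | case3 x y rest ih => simp [checkGo, pvEvens, pvOdds, ih]; ring

theorem check_eq_alt (list1 : List Int) : check list1 = check_alt list1 := by
  have h := check_loop_inv list1 list1 0 0 (by decide) (by simp)
  simp only [Nat.cast_zero] at h
  show (if PySem.Int.mod
      ((PySem.List.pyRange 0 (list1.length : Int) 1).foldl (checkStep list1) 0) 10 == 0
    then true else false) = check_alt list1
  rw [h, zero_add]
  unfold check_alt
  rw [slice_evens, slice_odds]
  simp only [Option.getD_some]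
  rw [← checkGo_eq_parity]
  cases hb : (PySem.Int.mod (checkGo list1) 10 == 0) <;> rfl

-- ===== VERDICT (by name: the statement is the Claim_ definition above) =====
theorem check_spec : Claim_equal_check := by
  intro list1 _
  exact check_eq_alt list1
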